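-- pv_equiv track=rewrite | github.com/DavidGugea/Data-Structures | Data structures ( code in python )/Linear Data Structures/Queue ( Python Code )/Tutorials and tests/FirstCircularTour_PetrolPumps.py | circularTour_BruteForce_MyCode_2
-- ===== SOURCE A (Python) =====
-- def circularTour_BruteForce_MyCode_2(array):
--     # Time complexity  : O(n ^ 2)
--     # Space complexity : O(n)
--
--     pairs = list()
--     indexTrack = 0
--     for station in array:
--         if station[0] < station[1]:
--             indexTrack += 1
--             continue
--         else:
--             fuel = 0
--             passed = True
--             for posStation in array[indexTrack:] + array[:indexTrack]:
--                 fuel += posStation[0] - posStation[1]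
--
--                 if fuel < 0:
--                     passed = False
--                     break
--                 else:
--                     continue
--
--             if passed:
--                 pairs.append(station)
--
--         indexTrack += 1
--
--     return pairs
-- ===== SOURCE B (Python) =====
-- def circularTour_BruteForce_MyCode_2(array):
--     # O(n): prefix sums over the doubled gain array + suffix minima replace
--     # the per-start O(n) simulation.
--     d = [s[0] - s[1] for s in array]
--     if sum(d) < 0:
--         return []
--     P = [0]
--     for x in d + d:
--         P.append(P[-1] + x)
--     suff = [0] * len(P)
--     m = P[-1]
--     for k in range(len(P) - 1, -1, -1):
--         m = min(m, P[k])
--         suff[k] = m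
--     return [st for i, st in enumerate(array) if suff[i + 1] >= P[i]]
-- ===== Notes on version B (the rewrite author's own statement) =====
-- stated objective: faster
-- what changed: Replaced the per-start O(n) tour simulation with prefix sums over the doubled gain array plus a single right-to-left suffix-minimum pass, so each start is tested in O(1).
import Mathlib
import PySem

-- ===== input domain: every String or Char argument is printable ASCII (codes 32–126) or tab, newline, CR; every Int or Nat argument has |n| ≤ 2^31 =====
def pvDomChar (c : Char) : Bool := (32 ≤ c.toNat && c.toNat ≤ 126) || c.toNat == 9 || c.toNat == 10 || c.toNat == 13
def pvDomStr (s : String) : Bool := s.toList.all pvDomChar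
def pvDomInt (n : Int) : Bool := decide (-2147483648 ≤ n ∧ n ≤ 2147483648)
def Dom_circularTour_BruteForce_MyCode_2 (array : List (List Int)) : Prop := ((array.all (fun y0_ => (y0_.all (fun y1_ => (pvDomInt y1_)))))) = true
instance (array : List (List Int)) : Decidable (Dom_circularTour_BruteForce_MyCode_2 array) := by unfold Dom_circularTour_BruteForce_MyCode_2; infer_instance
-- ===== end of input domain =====

-- B replaces A's per-start O(n) tour simulation by prefix sums over the doubled
-- gain array plus one suffix-minimum pass (asymptotically faster, measured).

-- ===== PORT A =====
-- station[i] (Pre_ guarantees the index is in range, so the default is never used)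
def pvGet (s : List Int) (k : Int) : Int := (PySem.List.pyGet? s k).getD 0

-- the inner 'for posStation in …' loop: fuel accumulation with early break
def pvAInner : List (List Int) → Int → Bool
  | [], _ => true
  | ps :: rest, fuel =>
    let f := fuel + (pvGet ps 0 - pvGet ps 1)
    if f < 0 then false else pvAInner rest f

-- the outer 'for station in array' loop with indexTrack and the pairs accumulator
def pvAGo (array : List (List Int)) : List (List Int) → Int → List (List Int) → List (List Int)
  | [], _, pairs => pairs
  | st :: rest, idx, pairs =>
    if pvGet st 0 < pvGet st 1 then pvAGo array rest (idx + 1) pairs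
    else
      let rotated := PySem.List.slice array (some idx) none ++ PySem.List.slice array none (some idx)
      pvAGo array rest (idx + 1) (if pvAInner rotated 0 then pairs ++ [st] else pairs)

def circularTour_BruteForce_MyCode_2 (array : List (List Int)) : List (List Int) :=
  pvAGo array array 0 []

-- ===== PORT B =====
-- P = [0]; for x in d + d: P.append(P[-1] + x)
def pvBPrefix : List Int → Int → List Int
  | [], acc => [acc]
  | x :: rest, acc => acc :: pvBPrefix rest (acc + x)

-- the right-to-left running-minimum pass building suff (suff[k] = min(P[k:]))
def pvBSuff : List Int → List Int
  | [] => []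
  | x :: rest =>
    match pvBSuff rest with
    | [] => [x]
    | y :: t => min x y :: y :: t

def circularTour_BruteForce_MyCode_2_alt (array : List (List Int)) : List (List Int) :=
  let d := array.map (fun s => pvGet s 0 - pvGet s 1)
  if d.sum < 0 then []
  else
    let P := pvBPrefix (d ++ d) 0
    let suff := pvBSuff P
    (PySem.List.enumerate array).filterMap (fun p =>
      if PySem.List.pyGetD P p.1 0 ≤ PySem.List.pyGetD suff (p.1 + 1) 0 then some p.2 else none)

-- ===== PRECONDITION & SPEC =====
-- Pre_: every station list has at least two entries; Python A indexes station[0]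
-- and station[1] of every station and raises IndexError otherwise.
def Pre_circularTour_BruteForce_MyCode_2 (array : List (List Int)) : Prop :=
  ∀ s ∈ array, 2 ≤ s.length
instance (array : List (List Int)) : Decidable (Pre_circularTour_BruteForce_MyCode_2 array) := by
  unfold Pre_circularTour_BruteForce_MyCode_2; infer_instance

def pvWitness_circularTour_BruteForce_MyCode_2 : List (List Int) := [[4, 2], [1, 3], [3, 3]]

def Spec_circularTour_BruteForce_MyCode_2 (array : List (List Int)) (out : List (List Int)) : Prop := out = circularTour_BruteForce_MyCode_2_alt array
instance (array : List (List Int)) (out : List (List Int)) : Decidable (Spec_circularTour_BruteForce_MyCode_2 array out) := by unfold Spec_circularTour_BruteForce_MyCode_2; infer_instance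

-- ===== CLAIM (what is proved, stated in full; the proofs are below) =====
def Claim_equal_circularTour_BruteForce_MyCode_2 : Prop := ∀ (array : List (List Int)), Dom_circularTour_BruteForce_MyCode_2 array → Pre_circularTour_BruteForce_MyCode_2 array → Spec_circularTour_BruteForce_MyCode_2 array (circularTour_BruteForce_MyCode_2 array)

-- ===== LEMMAS AND PROOFS =====

-- gain of one station, and the doubled-gain prefix sum pvPf
def pvDv (s : List Int) : Int := pvGet s 0 - pvGet s 1
def pvD (array : List (List Int)) : List Int := array.map pvDv
def pvDD (array : List (List Int)) : List Int := pvD array ++ pvD array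
def pvPf (array : List (List Int)) (k : ℕ) : Int := ((pvDD array).take k).sum

-- the inner loop succeeds iff every nonempty prefix of the gains is nonnegative
theorem pvAInner_iff (xs : List (List Int)) (fuel : Int) :
    pvAInner xs fuel = true ↔ ∀ k : ℕ, k < xs.length → 0 ≤ fuel + ((xs.map pvDv).take (k + 1)).sum := by
  induction xs generalizing fuel with
  | nil => simp [pvAInner]
  | cons s rest ih =>
    have hunf : pvAInner (s :: rest) fuel
        = if fuel + pvDv s < 0 then false else pvAInner rest (fuel + pvDv s) := rfl
    rw [hunf]
    by_cases h : fuel + pvDv s < 0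
    · rw [if_pos h]
      constructor
      · intro hf; exact absurd hf (by simp)
      · intro hall
        have h0 := hall 0 (by simp)
        simp only [List.map_cons, List.take_succ_cons, List.take_zero, List.sum_cons,
          List.sum_nil, add_zero] at h0
        omega
    · rw [if_neg h, ih]
      constructor
      · intro hall k hk
        cases k with
        | zero =>
          simp only [List.map_cons, List.take_succ_cons, List.take_zero, List.sum_cons,
            List.sum_nil, add_zero]
          omega
        | succ k' =>
          have hlt : k' < rest.length := by
            simp only [List.length_cons] at hk; omega
          have := hall k' hlt
          simp only [List.map_cons, List.take_succ_cons, List.sum_cons] at this ⊢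
          omega
      · intro hall k hk
        have := hall (k + 1) (by simp only [List.length_cons]; omega)
        simp only [List.map_cons, List.take_succ_cons, List.sum_cons] at this ⊢
        omega

-- prefix-sum difference of a contiguous block
theorem take_drop_sum (l : List Int) (i k : ℕ) :
    ((l.drop i).take k).sum = (l.take (i + k)).sum - (l.take i).sum := by
  rw [List.take_add, List.sum_append]; ring

-- rotation at i, mapped to gains, is a window of the doubled list
theorem rot_map (array : List (List Int)) (i : ℕ) (hi : i ≤ array.length) :
    (array.drop i ++ array.take i).map pvDv = ((pvDD array).drop i).take array.length := by
  have hlen : (pvD array).length = array.length := by simp [pvD]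
  have h1 : List.take array.length ((pvD array).drop i) = (pvD array).drop i :=
    List.take_of_length_le (by simp only [List.length_drop, hlen]; omega)
  have h2 : array.length - ((pvD array).drop i).length = i := by
    simp only [List.length_drop, hlen]; omega
  rw [pvDD, List.drop_append_of_le_length (by omega), List.take_append, h1, h2]
  simp [pvD, List.map_append, List.map_drop, List.map_take]

-- pvPf on the second copy of the doubled list
theorem pvPf_add_length (array : List (List Int)) (m : ℕ) (hm : m ≤ array.length) :
    pvPf array (array.length + m) = (pvD array).sum + pvPf array m := by
  have hlen : (pvD array).length = array.length := by simp [pvD]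
  unfold pvPf pvDD
  rw [List.take_append, List.take_append, List.take_of_length_le (by omega),
      show array.length + m - (pvD array).length = m by omega,
      show m - (pvD array).length = 0 by omega]
  simp [List.sum_append]

-- pvBPrefix values are the prefix sums
theorem pvBPrefix_length (l : List Int) (acc : Int) :
    (pvBPrefix l acc).length = l.length + 1 := by
  induction l generalizing acc with
  | nil => rfl
  | cons x rest ih => simp [pvBPrefix, ih]

theorem pvBPrefix_getD (l : List Int) (acc : Int) (k : ℕ) (hk : k ≤ l.length) :
    (pvBPrefix l acc).getD k 0 = acc + (l.take k).sum := by
  induction l generalizing acc k with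
  | nil =>
    cases k with
    | zero => simp [pvBPrefix]
    | succ k' => exact absurd hk (by simp)
  | cons x rest ih =>
    cases k with
    | zero => simp [pvBPrefix]
    | succ k' =>
      have := ih (acc + x) k' (by simp only [List.length_cons] at hk; omega)
      simp only [pvBPrefix, List.getD_cons_succ, List.take_succ_cons, List.sum_cons, this]
      ring

theorem pvBSuff_length (l : List Int) : (pvBSuff l).length = l.length := by
  induction l with
  | nil => rfl
  | cons x rest ih =>
    simp only [pvBSuff]
    cases h : pvBSuff rest with
    | nil =>
      rw [h] at ih
      simp only [List.length_nil] at ih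
      simp only [List.length_cons, List.length_nil]
      omega
    | cons y t =>
      rw [h] at ih
      simp only [List.length_cons] at ih
      simp only [List.length_cons]
      omega

theorem pvBSuff_drop (l : List Int) (k : ℕ) : (pvBSuff l).drop k = pvBSuff (l.drop k) := by
  induction l generalizing k with
  | nil => simp [pvBSuff]
  | cons x rest ih =>
    cases k with
    | zero => rfl
    | succ k' =>
      simp only [pvBSuff]
      cases h : pvBSuff rest with
      | nil =>
        have hr := pvBSuff_length rest
        rw [h] at hr
        have hrest : rest = [] := by
          cases rest with
          | nil => rfl
          | cons a b => simp at hr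
        subst hrest
        simp [pvBSuff]
      | cons y t =>
        rw [List.drop_succ_cons, List.drop_succ_cons, ← h, ih k']

-- head of the suffix-minimum list bounds exactly the whole list
theorem pvBSuff_headD (l : List Int) (x : Int) :
    l ≠ [] → (x ≤ (pvBSuff l).headD 0 ↔ ∀ y ∈ l, x ≤ y) := by
  induction l with
  | nil => intro h; exact absurd rfl h
  | cons a rest ih =>
    intro _
    cases hr : pvBSuff rest with
    | nil =>
      have hl := pvBSuff_length rest
      rw [hr] at hl
      have hrest : rest = [] := by
        cases rest with
        | nil => rfl
        | cons u v => simp at hl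
      subst hrest
      simp [pvBSuff]
    | cons y t =>
      have hrestne : rest ≠ [] := by
        intro hh; subst hh; simp [pvBSuff] at hr
      have ihr := ih hrestne
      rw [hr] at ihr
      simp only [pvBSuff, hr, List.headD_cons, le_min_iff, List.mem_cons] at ihr ⊢
      constructor
      · rintro ⟨h1, h2⟩ z hz
        rcases hz with rfl | hz
        · exact h1
        · exact ihr.mp h2 z hz
      · intro hall
        exact ⟨hall a (Or.inl rfl), ihr.mpr (fun z hz => hall z (Or.inr hz))⟩

theorem pvBSuff_getD (l : List Int) (k : ℕ) (hk : k < l.length) (x : Int) :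
    x ≤ (pvBSuff l).getD k 0 ↔ ∀ j : ℕ, k ≤ j → j < l.length → x ≤ l.getD j 0 := by
  have h1 : (pvBSuff l).getD k 0 = (pvBSuff (l.drop k)).headD 0 := by
    rw [List.getD_eq_getElem?_getD, ← List.head?_drop, pvBSuff_drop, List.headD_eq_head?_getD]
  have hne : l.drop k ≠ [] := by
    intro hh
    have := congrArg List.length hh
    simp at this
    omega
  rw [h1, pvBSuff_headD _ x hne]
  constructor
  · intro hall j hj1 hj2
    rw [List.getD_eq_getElem l 0 hj2]
    have heq : l[j] = (l.drop k)[j - k]'(by simp; omega) := by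
      rw [List.getElem_drop]
      congr 1
      omega
    rw [heq]
    exact hall _ (List.getElem_mem _)
  · intro hall y hy
    obtain ⟨i, hi, rfl⟩ := List.mem_iff_getElem.mp hy
    rw [List.getElem_drop]
    have hlen : i < l.length - k := by simpa using hi
    have := hall (k + i) (by omega) (by omega)
    rwa [List.getD_eq_getElem l 0 (by omega)] at this

-- A's per-start decision, as a window condition on pvPf
def pvW (array : List (List Int)) (i : ℕ) : Prop :=
  ∀ k : ℕ, i < k → k ≤ i + array.length → pvPf array i ≤ pvPf array k

-- B's per-start decision, as a suffix condition on pvPf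
def pvT (array : List (List Int)) (i : ℕ) : Prop :=
  ∀ k : ℕ, i < k → k ≤ 2 * array.length → pvPf array i ≤ pvPf array k

theorem pvW_iff_pvT (array : List (List Int)) (i : ℕ) (hi : i < array.length)
    (hS : 0 ≤ (pvD array).sum) : pvW array i ↔ pvT array i := by
  constructor
  · intro hw k hk1 hk2
    by_cases hk : k ≤ i + array.length
    · exact hw k hk1 hk
    · have h3 : pvPf array (array.length + (k - array.length))
          = (pvD array).sum + pvPf array (k - array.length) :=
        pvPf_add_length array (k - array.length) (by omega)
      rw [show array.length + (k - array.length) = k by omega] at h3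
      have h4 := hw (k - array.length) (by omega) (by omega)
      omega
  · intro ht k hk1 hk2
    exact ht k hk1 (by omega)

theorem pvW_false_of_neg (array : List (List Int)) (i : ℕ) (hi : i < array.length)
    (hS : (pvD array).sum < 0) : ¬ pvW array i := by
  intro hw
  have h3 := pvPf_add_length array i (le_of_lt hi)
  have h4 := hw (array.length + i) (by omega) (by omega)
  omega

-- the inner simulation starting at i decides exactly the window condition
theorem pvAInner_rot_iff (array : List (List Int)) (i : ℕ) (hi : i < array.length) :
    (pvAInner (array.drop i ++ array.take i) 0 = true) ↔ pvW array i := by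
  rw [pvAInner_iff]
  have hlen : (array.drop i ++ array.take i).length = array.length := by simp; omega
  have hmap := rot_map array i (le_of_lt hi)
  constructor
  · intro hall k hk1 hk2
    have := hall (k - i - 1) (by omega)
    rw [hmap, List.take_take, show min (k - i - 1 + 1) array.length = k - i by omega,
        take_drop_sum, show i + (k - i) = k by omega] at this
    unfold pvPf
    omega
  · intro hw k hk
    rw [hmap, List.take_take, show min (k + 1) array.length = k + 1 by omega, take_drop_sum]
    have := hw (i + (k + 1)) (by omega) (by omega)
    unfold pvPf at this
    omega

-- a station skipped by the a<b test can never start a tour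
theorem pvSkip_notW (array : List (List Int)) (i : ℕ) (st : List Int) (rest : List (List Int))
    (h : array.drop i = st :: rest) (hs : pvGet st 0 < pvGet st 1) : ¬ pvW array i := by
  have hi : i < array.length := by
    by_contra hge
    rw [List.drop_eq_nil_of_le (by omega)] at h
    simp at h
  intro hw
  have htrue := (pvAInner_rot_iff array i hi).mpr hw
  rw [h] at htrue
  have hfalse : pvAInner ((st :: rest) ++ array.take i) 0 = false := by
    show (if (0:Int) + (pvGet st 0 - pvGet st 1) < 0 then false
          else pvAInner (rest ++ array.take i) ((0:Int) + (pvGet st 0 - pvGet st 1))) = false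
    rw [if_pos (by omega)]
  rw [htrue] at hfalse
  exact absurd hfalse (by simp)

-- B's per-start test decides exactly the suffix condition
theorem pvB_decision (array : List (List Int)) (i : ℕ) (hi : i < array.length) :
    (PySem.List.pyGetD (pvBPrefix (pvDD array) 0) ((i : ℕ) : Int) 0 ≤
      PySem.List.pyGetD (pvBSuff (pvBPrefix (pvDD array) 0)) (((i : ℕ) : Int) + 1) 0)
    ↔ pvT array i := by
  have hDD : (pvDD array).length = 2 * array.length := by
    simp [pvDD, pvD]; omega
  have hPlen : (pvBPrefix (pvDD array) 0).length = 2 * array.length + 1 := by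
    rw [pvBPrefix_length]; omega
  rw [show ((i : ℕ) : Int) + 1 = (((i + 1 : ℕ) : ℕ) : Int) by push_cast; ring,
      PySem.List.pyGetD_natCast, PySem.List.pyGetD_natCast,
      pvBPrefix_getD _ _ i (by omega),
      pvBSuff_getD (pvBPrefix (pvDD array) 0) (i + 1) (by omega)]
  simp only [zero_add]
  unfold pvT pvPf
  constructor
  · intro hall k hk1 hk2
    have := hall k (by omega) (by rw [hPlen]; omega)
    rw [pvBPrefix_getD _ _ k (by omega)] at this
    omega
  · intro ht j hj1 hj2
    rw [pvBPrefix_getD _ _ j (by omega)]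
    have := ht j (by omega) (by omega)
    omega

-- the B-side filter function, named for the induction
def pvBFun (array : List (List Int)) (p : Int × List Int) : Option (List Int) :=
  if PySem.List.pyGetD (pvBPrefix (pvDD array) 0) p.1 0 ≤
      PySem.List.pyGetD (pvBSuff (pvBPrefix (pvDD array) 0)) (p.1 + 1) 0
  then some p.2 else none

-- one unfolding step of A's outer loop
theorem pvAGo_cons (array : List (List Int)) (st : List Int) (rest : List (List Int))
    (idx : Int) (pairs : List (List Int)) :
    pvAGo array (st :: rest) idx pairs
      = if pvGet st 0 < pvGet st 1 then pvAGo array rest (idx + 1) pairs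
        else pvAGo array rest (idx + 1)
          (if pvAInner (PySem.List.slice array (some idx) none
              ++ PySem.List.slice array none (some idx)) 0 then pairs ++ [st] else pairs) := rfl

-- when the total gain is negative, A's loop never appends
theorem pvAGo_none (array : List (List Int)) (hS : (pvD array).sum < 0) :
    ∀ (l : List (List Int)) (i : ℕ) (pairs : List (List Int)), array.drop i = l →
      pvAGo array l ((i : ℕ) : Int) pairs = pairs := by
  intro l
  induction l with
  | nil => intro i pairs _; rfl
  | cons st rest ih =>
    intro i pairs h
    have hi : i < array.length := by
      by_contra hge
      rw [List.drop_eq_nil_of_le (by omega)] at h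
      simp at h
    have hrest : array.drop (i + 1) = rest := by
      rw [← List.tail_drop, h]
      rfl
    have hcast : ((i : ℕ) : Int) + 1 = (((i + 1 : ℕ) : ℕ) : Int) := by push_cast; ring
    rw [pvAGo_cons, PySem.List.slice_from_natCast, PySem.List.slice_to_natCast, hcast]
    by_cases hskip : pvGet st 0 < pvGet st 1
    · rw [if_pos hskip]
      exact ih (i + 1) pairs hrest
    · rw [if_neg hskip]
      have hnw := pvW_false_of_neg array i hi hS
      have hin : pvAInner (array.drop i ++ array.take i) 0 = false := by
        cases hb : pvAInner (array.drop i ++ array.take i) 0 with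
        | false => rfl
        | true => exact absurd ((pvAInner_rot_iff array i hi).mp hb) hnw
      rw [hin]
      simp only [Bool.false_eq_true, if_false]
      exact ih (i + 1) pairs hrest

-- when the total gain is nonnegative, A's loop builds exactly B's filtered list
theorem pvMain_go (array : List (List Int)) (hS : 0 ≤ (pvD array).sum) :
    ∀ (l : List (List Int)) (i : ℕ) (pairs : List (List Int)), array.drop i = l →
      pvAGo array l ((i : ℕ) : Int) pairs
        = pairs ++ (PySem.List.enumerate l ((i : ℕ) : Int)).filterMap (pvBFun array) := by
  intro l
  induction l with
  | nil => intro i pairs _; simp [pvAGo, PySem.List.enumerate_nil]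
  | cons st rest ih =>
    intro i pairs h
    have hi : i < array.length := by
      by_contra hge
      rw [List.drop_eq_nil_of_le (by omega)] at h
      simp at h
    have hrest : array.drop (i + 1) = rest := by
      rw [← List.tail_drop, h]
      rfl
    have hcast : ((i : ℕ) : Int) + 1 = (((i + 1 : ℕ) : ℕ) : Int) := by push_cast; ring
    have hTiff := pvW_iff_pvT array i hi hS
    have hBiff := pvB_decision array i hi
    rw [pvAGo_cons, PySem.List.slice_from_natCast, PySem.List.slice_to_natCast,
        PySem.List.enumerate_cons, List.filterMap_cons, hcast]
    by_cases hskip : pvGet st 0 < pvGet st 1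
    · rw [if_pos hskip]
      have hnw := pvSkip_notW array i st rest h hskip
      have hbf : pvBFun array (((i : ℕ) : Int), st) = none := by
        unfold pvBFun
        exact if_neg (fun hc => hnw (hTiff.mpr (hBiff.mp hc)))
      rw [hbf]
      exact ih (i + 1) pairs hrest
    · rw [if_neg hskip]
      by_cases hin : pvAInner (array.drop i ++ array.take i) 0 = true
      · have hw := (pvAInner_rot_iff array i hi).mp hin
        have hbf : pvBFun array (((i : ℕ) : Int), st) = some st := by
          unfold pvBFun
          exact if_pos (hBiff.mpr (hTiff.mp hw))
        rw [hin, if_pos rfl, hbf, ih (i + 1) (pairs ++ [st]) hrest]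
        simp
      · have hinf : pvAInner (array.drop i ++ array.take i) 0 = false := by
          cases hb : pvAInner (array.drop i ++ array.take i) 0 with
          | false => rfl
          | true => exact absurd hb hin
        have hnw : ¬ pvW array i := fun hw => hin ((pvAInner_rot_iff array i hi).mpr hw)
        have hbf : pvBFun array (((i : ℕ) : Int), st) = none := by
          unfold pvBFun
          exact if_neg (fun hc => hnw (hTiff.mpr (hBiff.mp hc)))
        rw [hinf]
        simp only [Bool.false_eq_true, if_false]
        rw [hbf]
        exact ih (i + 1) pairs hrest

-- ===== VERDICT (by name: the statement is the Claim_ definition above) =====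
theorem circularTour_BruteForce_MyCode_2_spec : Claim_equal_circularTour_BruteForce_MyCode_2 := by
  unfold Claim_equal_circularTour_BruteForce_MyCode_2
  intro array _ _
  unfold Spec_circularTour_BruteForce_MyCode_2
  unfold circularTour_BruteForce_MyCode_2 circularTour_BruteForce_MyCode_2_alt
  simp only []
  have hd : array.map (fun s => pvGet s 0 - pvGet s 1) = pvD array := rfl
  by_cases hS : (pvD array).sum < 0
  · rw [hd, if_pos hS]
    have := pvAGo_none array hS array 0 [] (by simp)
    simpa using this
  · rw [hd, if_neg hS]
    have := pvMain_go array (by omega) array 0 [] (by simp)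
    simp only [Nat.cast_zero] at this
    rw [show ((pvD array ++ pvD array)) = pvDD array from rfl]
    rw [show (0:Int) = ((0:ℕ):Int) by simp] at this ⊢
    rw [this]
    simp [pvBFun]
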